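-- pv_equiv track=rewrite | github.com/wiserlake0996/text-extract-py | py.py | extractDROID
-- ===== SOURCE A (Python) =====
-- def extractDROID(droid_extract):
--     droid_split_by_error = []
--     droid_string = ""
--     line_length = 7
--
--     #check if 'PROBLEM:' exists in line to identify start of an error set"""
--     for d in range(len(droid_extract)):
--
--         line_length = len(droid_extract[d].split(' '))
--         if(line_length < 6):
--
--             #add the header / error name to string
--             droid_string +=droid_extract[d]+"\n"
--
--             #Loop and add every other line to string till another error set is found"""
--             for d2 in range(d+1, len(droid_extract)):
--                 #if at the end, add the last item and exit
--                 if d2 == len(droid_extract):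
--                     droid_split_by_error.append(droid_string)
--                     break
--
--                 line_length = len(droid_extract[d2].split(' '))
--                 if(line_length < 6):
--                     droid_split_by_error.append(droid_string)
--                     #re-focus pointer of outer loop to inner (loop -1) landing just before the next error set header
--                     d= d2 - 1
--                     droid_string = ""
--                     break
--
--                 droid_string += droid_extract[d2] + "\n"
--
--     return droid_split_by_error
-- ===== SOURCE B (Python) =====
-- def extractDROID(droid_extract):
--     # Header lines are those with fewer than 6 space-separated fields.
--     headers = [i for i, line in enumerate(droid_extract) if len(line.split(' ')) < 6]
--     # One block per consecutive header pair; the block after the last header is dropped (as in A).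
--     return [''.join(line + '\n' for line in droid_extract[a:b])
--             for a, b in zip(headers, headers[1:])]
-- ===== Notes on version B (the rewrite author's own statement) =====
-- stated objective: simpler
-- what changed: B first builds the list of header line indices (lines with fewer than 6 space-separated fields) in one pass, then emits one block per consecutive header pair by slicing, replacing A's nested forward-rescanning loops and carried string accumulator; the block after the last header is dropped exactly as in A.
import Mathlib
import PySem

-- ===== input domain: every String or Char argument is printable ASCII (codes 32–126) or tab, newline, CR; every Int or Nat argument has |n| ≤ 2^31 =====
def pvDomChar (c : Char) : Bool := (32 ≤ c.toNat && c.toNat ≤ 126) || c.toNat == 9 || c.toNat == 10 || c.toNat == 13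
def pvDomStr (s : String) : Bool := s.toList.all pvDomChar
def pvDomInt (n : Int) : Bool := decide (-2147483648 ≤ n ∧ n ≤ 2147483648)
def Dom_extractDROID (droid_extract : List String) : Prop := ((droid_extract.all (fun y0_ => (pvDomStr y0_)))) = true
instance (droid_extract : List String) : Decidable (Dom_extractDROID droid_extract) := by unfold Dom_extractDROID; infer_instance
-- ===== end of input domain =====

-- B replaces A's nested rescanning loops by a header-index table and one pass over
-- consecutive header pairs (objective: simpler); same return value on every input.

-- ===== PORT A =====
-- shared helper: the header test `len(line.split(' ')) < 6`
def isHdr (l : String) : Bool := decide ((PySem.Chars.splitOn l.toList [' ']).length < 6)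

-- inner loop `for d2 in range(d+1, len(...))` of A; the string accumulator is kept as
-- List Char (String.ofList when appended to the result); the `if d2 == len(droid_extract)`
-- branch of A is unreachable (range(d+1, n) never yields n) and has no counterpart here.
def innerA (xs : List String) (d2 : Nat) (s : List Char) (res : List String) :
    List String × List Char :=
  if h : d2 < xs.length then
    if isHdr xs[d2] then (res ++ [String.ofList s], [])
    else innerA xs (d2 + 1) (s ++ (xs[d2]).toList ++ ['\n']) res
  else (res, s)
termination_by xs.length - d2

-- outer loop `for d in range(len(...))`; the Python `d = d2 - 1` has no effect on a
-- range-based for loop, so the outer index simply advances by one, as here.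
def outerA (xs : List String) (d : Nat) (s : List Char) (res : List String) : List String :=
  if h : d < xs.length then
    if isHdr xs[d] then
      let p := innerA xs (d + 1) (s ++ (xs[d]).toList ++ ['\n']) res
      outerA xs (d + 1) p.2 p.1
    else outerA xs (d + 1) s res
  else res
termination_by xs.length - d

def extractDROID (droid_extract : List String) : List String :=
  outerA droid_extract 0 [] []

-- ===== PORT B =====
-- headers = [i for i, line in enumerate(...) if len(line.split(' ')) < 6];
-- then one block per consecutive header pair; ''.join(line+'\n' ...) is the flat
-- concatenation of the lines of the slice, each followed by '\n'.
def extractDROID_alt (droid_extract : List String) : List String :=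
  let H : List Int :=
    ((PySem.List.enumerate droid_extract 0).filter (fun p => isHdr p.2)).map (fun p => p.1)
  (H.zip (H.drop 1)).map (fun ab =>
    String.ofList ((PySem.List.slice droid_extract (some ab.1) (some ab.2)).flatMap
      (fun l => l.toList ++ ['\n'])))

-- ===== PRECONDITION & SPEC =====
def Spec_extractDROID (droid_extract : List String) (out : List String) : Prop := out = extractDROID_alt droid_extract
instance (droid_extract : List String) (out : List String) : Decidable (Spec_extractDROID droid_extract out) := by unfold Spec_extractDROID; infer_instance

-- ===== CLAIM (what is proved, stated in full; the proofs are below) =====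
def Claim_equal_extractDROID : Prop := ∀ (droid_extract : List String), Dom_extractDROID droid_extract → Spec_extractDROID droid_extract (extractDROID droid_extract)

-- ===== LEMMAS AND PROOFS =====

-- header indices ≥ d, in increasing order
def hdrsFrom (xs : List String) (d : Nat) : List Nat :=
  (List.range' d (xs.length - d)).filter (fun i => isHdr (xs[i]?.getD ""))

-- characters of lines xs[a:b], each followed by '\n'
def body (xs : List String) (a b : Nat) : List Char :=
  ((xs.drop a).take (b - a)).flatMap (fun l => l.toList ++ ['\n'])

def zipBlocks (xs : List String) (L : List Nat) : List String :=
  (L.zip L.tail).map (fun ab => String.ofList (body xs ab.1 ab.2))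

theorem hdrsFrom_of_ge (xs : List String) (d : Nat) (h : xs.length ≤ d) :
    hdrsFrom xs d = [] := by
  unfold hdrsFrom
  rw [Nat.sub_eq_zero_of_le h]
  rfl

theorem hdrsFrom_succ_of_lt (xs : List String) (d : Nat) (h : d < xs.length) :
    hdrsFrom xs d =
      (if isHdr (xs[d]?.getD "") then [d] else []) ++ hdrsFrom xs (d + 1) := by
  have hr : xs.length - d = (xs.length - (d + 1)) + 1 := by omega
  simp only [hdrsFrom, hr, List.range'_succ, List.filter_cons]
  split <;> simp

theorem mem_hdrsFrom_ge (xs : List String) (d : Nat) {i : Nat}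
    (h : i ∈ hdrsFrom xs d) : d ≤ i ∧ i < xs.length := by
  have h1 := (List.mem_filter.mp h).1
  have h2 := List.mem_range'.mp h1
  omega

theorem getD_eq_get (xs : List String) (d : Nat) (h : d < xs.length) :
    xs[d]?.getD "" = xs[d] := by
  rw [List.getElem?_eq_getElem h]; rfl

theorem body_self (xs : List String) (a : Nat) : body xs a a = [] := by
  simp [body]

theorem body_ge (xs : List String) (a b : Nat) (h : xs.length ≤ a) :
    body xs a b = [] := by
  simp [body, List.drop_eq_nil_of_le h]

theorem body_cons (xs : List String) (a b : Nat) (ha : a < xs.length) (hab : a < b) :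
    body xs a b = (xs[a]).toList ++ ['\n'] ++ body xs (a + 1) b := by
  have hd : xs.drop a = xs[a] :: xs.drop (a + 1) := List.drop_eq_getElem_cons ha
  have hb : b - a = (b - (a + 1)) + 1 := by omega
  unfold body
  rw [hd, hb, List.take_succ_cons, List.flatMap_cons, List.append_assoc]

-- innerA computed: scan from d2 up to the next header (or the end)
theorem innerA_eq_aux (xs : List String) :
    ∀ (k d2 : Nat), xs.length ≤ d2 + k →
    ∀ (s : List Char) (res : List String),
      innerA xs d2 s res =
        match (hdrsFrom xs d2).head? with
        | some h' => (res ++ [String.ofList (s ++ body xs d2 h')], [])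
        | none => (res, s ++ body xs d2 xs.length) := by
  intro k
  induction k with
  | zero =>
    intro d2 hk s res
    rw [innerA]
    have h : ¬ d2 < xs.length := by omega
    simp only [h, dif_neg, not_false_eq_true]
    rw [hdrsFrom_of_ge xs d2 (by omega)]
    rw [body_ge xs d2 xs.length (by omega)]
    simp
  | succ k ih =>
    intro d2 hk s res
    by_cases h : d2 < xs.length
    · rw [innerA]
      rw [hdrsFrom_succ_of_lt xs d2 h, getD_eq_get xs d2 h]
      simp only [h, dif_pos]
      by_cases hh : isHdr xs[d2]
      · simp [hh, body_self]
      · simp only [hh, Bool.false_eq_true, if_neg, not_false_eq_true, List.nil_append]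
        rw [ih (d2 + 1) (by omega) (s ++ (xs[d2]).toList ++ ['\n']) res]
        cases hhd : (hdrsFrom xs (d2 + 1)).head? with
        | none =>
          simp only
          rw [body_cons xs d2 xs.length h h]
          simp
        | some h' =>
          have hmem : h' ∈ hdrsFrom xs (d2 + 1) := List.mem_of_mem_head? hhd
          have hge := mem_hdrsFrom_ge xs (d2 + 1) hmem
          simp only
          rw [body_cons xs d2 h' h (by omega)]
          simp
    · rw [innerA]
      simp only [h, dif_neg, not_false_eq_true]
      rw [hdrsFrom_of_ge xs d2 (by omega)]
      rw [body_ge xs d2 xs.length (by omega)]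
      simp

theorem innerA_eq (xs : List String) (d2 : Nat) :
    ∀ (s : List Char) (res : List String),
      innerA xs d2 s res =
        match (hdrsFrom xs d2).head? with
        | some h' => (res ++ [String.ofList (s ++ body xs d2 h')], [])
        | none => (res, s ++ body xs d2 xs.length) :=
  innerA_eq_aux xs xs.length d2 (by omega)

-- once there is no header at or after d, the outer loop does nothing more
theorem outerA_no_hdr_aux (xs : List String) :
    ∀ (k d : Nat), xs.length ≤ d + k → hdrsFrom xs d = [] →
    ∀ (s : List Char) (res : List String), outerA xs d s res = res := by
  intro k
  induction k with
  | zero =>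
    intro d hk hno s res
    rw [outerA]
    have h : ¬ d < xs.length := by omega
    simp [h]
  | succ k ih =>
    intro d hk hno s res
    by_cases h : d < xs.length
    · have hstep := hdrsFrom_succ_of_lt xs d h
      rw [hno] at hstep
      have hh : isHdr (xs[d]?.getD "") = false := by
        by_contra hc
        rw [Bool.not_eq_false] at hc
        rw [hc] at hstep
        simp at hstep
      have htail : hdrsFrom xs (d + 1) = [] := by
        rw [hh] at hstep
        simpa using hstep.symm
      rw [outerA]
      rw [getD_eq_get xs d h] at hh
      simp only [h, dif_pos, hh, Bool.false_eq_true, if_neg, not_false_eq_true]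
      exact ih (d + 1) (by omega) htail s res
    · rw [outerA]; simp [h]

theorem outerA_no_hdr (xs : List String) (d : Nat) (hno : hdrsFrom xs d = []) :
    ∀ (s : List Char) (res : List String), outerA xs d s res = res :=
  outerA_no_hdr_aux xs xs.length d (by omega) hno

theorem zipBlocks_cons (xs : List String) (a b : Nat) (L : List Nat) :
    zipBlocks xs (a :: b :: L) = String.ofList (body xs a b) :: zipBlocks xs (b :: L) := rfl

-- main invariant of the outer loop (empty running string)
theorem outerA_eq_aux (xs : List String) :
    ∀ (k d : Nat), xs.length ≤ d + k →
    ∀ (res : List String), outerA xs d [] res = res ++ zipBlocks xs (hdrsFrom xs d) := by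
  intro k
  induction k with
  | zero =>
    intro d hk res
    rw [outerA]
    have h : ¬ d < xs.length := by omega
    simp only [h, dif_neg, not_false_eq_true]
    rw [hdrsFrom_of_ge xs d (by omega)]
    simp [zipBlocks]
  | succ k ih =>
    intro d hk res
    by_cases h : d < xs.length
    · by_cases hh : isHdr xs[d]
      · rw [outerA]
        simp only [h, dif_pos, hh, if_pos, List.nil_append]
        rw [innerA_eq xs (d + 1)]
        rw [hdrsFrom_succ_of_lt xs d h, getD_eq_get xs d h, hh]
        cases hhd : (hdrsFrom xs (d + 1)).head? with
        | none =>
          have hnil : hdrsFrom xs (d + 1) = [] := List.head?_eq_none_iff.mp hhd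
          simp only [hnil]
          rw [outerA_no_hdr xs (d + 1) hnil]
          simp [zipBlocks]
        | some h' =>
          obtain ⟨L, hL⟩ : ∃ L, hdrsFrom xs (d + 1) = h' :: L := by
            cases hE : hdrsFrom xs (d + 1) with
            | nil => rw [hE] at hhd; simp at hhd
            | cons x L => rw [hE] at hhd; simp at hhd; exact ⟨L, by rw [hhd]⟩
          have hmem : h' ∈ hdrsFrom xs (d + 1) := List.mem_of_mem_head? hhd
          have hge := mem_hdrsFrom_ge xs (d + 1) hmem
          simp only [hL]
          rw [ih (d + 1) (by omega)]
          rw [hL]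
          simp only [if_true, List.singleton_append, zipBlocks_cons]
          rw [body_cons xs d h' h (by omega)]
          simp
      · rw [outerA]
        simp only [h, dif_pos, hh, Bool.false_eq_true, if_neg, not_false_eq_true]
        rw [ih (d + 1) (by omega)]
        rw [hdrsFrom_succ_of_lt xs d h, getD_eq_get xs d h]
        simp [hh]
    · rw [outerA]
      simp only [h, dif_neg, not_false_eq_true]
      rw [hdrsFrom_of_ge xs d (by omega)]
      simp [zipBlocks]

theorem outerA_eq (xs : List String) (d : Nat) :
    ∀ (res : List String), outerA xs d [] res = res ++ zipBlocks xs (hdrsFrom xs d) :=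
  outerA_eq_aux xs xs.length d (by omega)

-- B's header list is the Int cast of the Nat header-index list
theorem enum_filter_map (xs : List String) :
    ∀ (s : Nat),
      ((PySem.List.enumerate xs (s : Int)).filter (fun p => isHdr p.2)).map (fun p => p.1) =
        ((List.range' s xs.length).filter (fun i => isHdr (xs[i - s]?.getD ""))).map
          (fun i : Nat => (i : Int)) := by
  induction xs with
  | nil => intro s; simp [PySem.List.enumerate_nil]
  | cons x xs ihx =>
    intro s
    rw [PySem.List.enumerate_cons]
    simp only [List.length_cons, List.range'_succ, List.filter_cons]
    have hc : ((s : Int) + 1) = ((s + 1 : Nat) : Int) := by push_cast; ring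
    have hself : x = ((x :: xs)[s - s]?.getD "") := by simp
    have hshift :
        (List.range' (s + 1) xs.length).filter (fun i => isHdr ((x :: xs)[i - s]?.getD "")) =
        (List.range' (s + 1) xs.length).filter (fun i => isHdr (xs[i - (s + 1)]?.getD "")) := by
      apply List.filter_congr
      intro i hi
      have hge := List.mem_range'.mp hi
      have hidx : i - s = (i - (s + 1)) + 1 := by omega
      rw [hidx]
      simp
    by_cases hh : isHdr x
    · rw [← hself]
      simp only [hh, if_pos, List.map_cons, hshift]
      rw [hc, ihx (s + 1)]
    · rw [← hself]
      simp only [hh, Bool.false_eq_true, if_neg, not_false_eq_true, hshift]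
      rw [hc, ihx (s + 1)]

theorem slice_body (xs : List String) (a b : Nat) :
    (PySem.List.slice xs (some (a : Int)) (some (b : Int))).flatMap
      (fun l => l.toList ++ ['\n']) = body xs a b := by
  rw [PySem.List.slice_natCast]
  rfl

theorem zip_cast_blocks (xs : List String) :
    ∀ (L : List Nat),
      (((L.map (fun i : Nat => (i : Int))).zip ((L.map (fun i : Nat => (i : Int))).drop 1)).map
        (fun ab => String.ofList ((PySem.List.slice xs (some ab.1) (some ab.2)).flatMap
          (fun l => l.toList ++ ['\n'])))) = zipBlocks xs L := by
  intro L
  induction L with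
  | nil => rfl
  | cons a L ihL =>
    cases L with
    | nil => rfl
    | cons b L' =>
      rw [zipBlocks_cons]
      simp only [List.map_cons, List.drop_one, List.tail_cons, List.zip_cons_cons,
        List.map_cons] at *
      rw [slice_body, ihL]

theorem alt_eq_zipBlocks (xs : List String) :
    extractDROID_alt xs = zipBlocks xs (hdrsFrom xs 0) := by
  unfold extractDROID_alt
  have h0 : ((0 : Int)) = ((0 : Nat) : Int) := by norm_num
  rw [h0, enum_filter_map xs 0]
  have hH : (List.range' 0 xs.length).filter (fun i => isHdr (xs[i - 0]?.getD "")) =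
      hdrsFrom xs 0 := by
    unfold hdrsFrom
    simp
  rw [hH]
  exact zip_cast_blocks xs (hdrsFrom xs 0)

-- ===== VERDICT (by name: the statement is the Claim_ definition above) =====
theorem extractDROID_spec : Claim_equal_extractDROID := by
  intro xs _
  unfold Spec_extractDROID extractDROID
  rw [outerA_eq xs 0 [], alt_eq_zipBlocks]
  simp
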